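-- pv_equiv track=rewrite | github.com/enpeluche/subset-sum-lll-mip | lll_analysis.py | project_consensus
-- ===== SOURCE A (Python) =====
-- def project_consensus(sub: list[list[int]], n: int) -> list[int | None]:
--     """
--     Strict consensus: assign a value only when all vectors agree in sign.
--     Ambiguous positions are marked None (CP-SAT remains free on those).
--
--     Args:
--         sub: List of integer vectors.
--         n:   Vector length.
--
--     Returns:
--         Vector of length n with values in {0, 1, None}.
--     """
--     hint = []
--     for i in range(n):
--         vals = [v[i] for v in sub]
--         if all(x >= 0 for x in vals):
--             hint.append(1 if sum(vals) > 0 else 0)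
--         elif all(x <= 0 for x in vals):
--             hint.append(0)
--         else:
--             hint.append(None)
--     return hint
-- ===== SOURCE B (Python) =====
-- def project_consensus(sub: list[list[int]], n: int) -> list[int | None]:
--     """Row-major single pass: fold each vector into per-column (has_neg, has_pos, colsum) accumulators, then render."""
--     acc = [(False, False, 0)] * max(n, 0)
--     for v in sub:
--         acc = [(hn or x < 0, hp or x > 0, s + x) for (hn, hp, s), x in zip(acc, v)]
--     return [((1 if s > 0 else 0) if not hn else (0 if not hp else None))
--             for hn, hp, s in acc]
-- ===== Notes on version B (the rewrite author's own statement) =====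
-- stated objective: alternative
-- what changed: Inverts the loop nesting: instead of materializing each column list and scanning it three times (two all() passes plus sum), B makes one row-major pass maintaining per-column (has_neg, has_pos, colsum) accumulators and renders the result from them.
import Mathlib
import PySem

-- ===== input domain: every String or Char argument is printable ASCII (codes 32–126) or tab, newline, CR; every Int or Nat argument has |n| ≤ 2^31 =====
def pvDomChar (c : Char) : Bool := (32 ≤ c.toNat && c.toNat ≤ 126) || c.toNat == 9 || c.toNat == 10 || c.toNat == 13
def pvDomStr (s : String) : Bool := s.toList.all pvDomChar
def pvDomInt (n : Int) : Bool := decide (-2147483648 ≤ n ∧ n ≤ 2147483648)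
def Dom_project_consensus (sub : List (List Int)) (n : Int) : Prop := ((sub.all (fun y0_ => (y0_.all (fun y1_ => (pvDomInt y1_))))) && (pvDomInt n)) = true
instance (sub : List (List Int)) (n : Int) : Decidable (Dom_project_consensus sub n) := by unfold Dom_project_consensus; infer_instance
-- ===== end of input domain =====

-- B inverts the loop nesting: one row-major pass over the vectors maintaining per-column
-- (has_neg, has_pos, colsum) accumulators, instead of materializing and rescanning each column.

-- ===== PORT A =====
-- v[i] is in range under Pre_, so pyGetD with default 0 is exact there.
def project_consensus (sub : List (List Int)) (n : Int) : List (Option Int) :=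
  (PySem.List.pyRange 0 n 1).foldl (fun hint i =>
    let vals := sub.map (fun v => PySem.List.pyGetD v i 0)
    if vals.all (fun x => decide (0 ≤ x)) then
      hint ++ [some (if 0 < vals.sum then 1 else 0)]
    else if vals.all (fun x => decide (x ≤ 0)) then
      hint ++ [some 0]
    else
      hint ++ [none]) []

-- ===== PORT B =====
def pcStep (t : Bool × Bool × Int) (x : Int) : Bool × Bool × Int :=
  (t.1 || decide (x < 0), t.2.1 || decide (0 < x), t.2.2 + x)

def pcRender (t : Bool × Bool × Int) : Option Int :=
  if !t.1 then some (if 0 < t.2.2 then 1 else 0)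
  else if !t.2.1 then some 0
  else none

def project_consensus_alt (sub : List (List Int)) (n : Int) : List (Option Int) :=
  let acc0 : List (Bool × Bool × Int) := List.replicate (max n 0).toNat (false, false, 0)
  let acc := sub.foldl (fun acc v => List.zipWith pcStep acc v) acc0
  acc.map pcRender

-- ===== PRECONDITION & SPEC =====
-- A indexes v[i] for every i in range(n): it raises IndexError unless every vector has length ≥ n.
def Pre_project_consensus (sub : List (List Int)) (n : Int) : Prop :=
  ∀ v ∈ sub, n ≤ (v.length : Int)
instance (sub : List (List Int)) (n : Int) : Decidable (Pre_project_consensus sub n) := by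
  unfold Pre_project_consensus; infer_instance

def pvWitness_project_consensus : List (List Int) × Int := ([[1, -1], [2, 0]], 2)

def Spec_project_consensus (sub : List (List Int)) (n : Int) (out : List (Option Int)) : Prop :=
  out = project_consensus_alt sub n
instance (sub : List (List Int)) (n : Int) (out : List (Option Int)) : Decidable (Spec_project_consensus sub n out) := by
  unfold Spec_project_consensus; infer_instance

-- ===== CLAIM (what is proved, stated in full; the proofs are below) =====
def Claim_equal_project_consensus : Prop := ∀ (sub : List (List Int)) (n : Int), Dom_project_consensus sub n → Pre_project_consensus sub n → Spec_project_consensus sub n (project_consensus sub n)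

-- ===== LEMMAS AND PROOFS =====

-- A's per-column value (proof-only helper).
def pcColA (sub : List (List Int)) (i : Int) : Option Int :=
  let vals := sub.map (fun v => PySem.List.pyGetD v i 0)
  if vals.all (fun x => decide (0 ≤ x)) then some (if 0 < vals.sum then 1 else 0)
  else if vals.all (fun x => decide (x ≤ 0)) then some 0
  else none

lemma pc_A_foldl (sub : List (List Int)) (l : List Int) (acc : List (Option Int)) :
    l.foldl (fun hint i =>
      let vals := sub.map (fun v => PySem.List.pyGetD v i 0)
      if vals.all (fun x => decide (0 ≤ x)) then
        hint ++ [some (if 0 < vals.sum then 1 else 0)]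
      else if vals.all (fun x => decide (x ≤ 0)) then
        hint ++ [some 0]
      else
        hint ++ [none]) acc = acc ++ l.map (pcColA sub) := by
  induction l generalizing acc with
  | nil => simp
  | cons i l ih =>
    rw [List.foldl_cons, ih, List.map_cons]
    simp only [pcColA]
    split_ifs <;> simp

lemma pc_A_eq_map (sub : List (List Int)) (n : Int) :
    project_consensus sub n = (PySem.List.pyRange 0 n 1).map (pcColA sub) := by
  unfold project_consensus
  rw [pc_A_foldl]
  simp

-- The zipWith-fold over the rows, characterized element-wise.
lemma pc_fold_elem (sub : List (List Int)) :
    ∀ (acc : List (Bool × Bool × Int)), (∀ v ∈ sub, acc.length ≤ v.length) →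
      (sub.foldl (fun acc v => List.zipWith pcStep acc v) acc).length = acc.length ∧
      ∀ j < acc.length,
        (sub.foldl (fun acc v => List.zipWith pcStep acc v) acc).getD j (false, false, 0) =
          sub.foldl (fun t v => pcStep t (v.getD j 0)) (acc.getD j (false, false, 0)) := by
  induction sub with
  | nil => intro acc _; exact ⟨rfl, fun j hj => rfl⟩
  | cons v sub ih =>
    intro acc hlen
    have hv : acc.length ≤ v.length := hlen v (List.mem_cons_self ..)
    have hz : (List.zipWith pcStep acc v).length = acc.length := by
      simp [List.length_zipWith]; omega
    have hrest : ∀ w ∈ sub, (List.zipWith pcStep acc v).length ≤ w.length := by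
      intro w hw; rw [hz]; exact hlen w (List.mem_cons_of_mem _ hw)
    obtain ⟨ihl, ihe⟩ := ih (List.zipWith pcStep acc v) hrest
    refine ⟨by simp only [List.foldl_cons]; rw [ihl, hz], ?_⟩
    intro j hj
    have hjz : j < (List.zipWith pcStep acc v).length := by omega
    have hjv : j < v.length := by omega
    simp only [List.foldl_cons]
    rw [ihe j hjz]
    congr 1
    rw [List.getD_eq_getElem _ _ hjz, List.getElem_zipWith, List.getD_eq_getElem _ _ hj,
        List.getD_eq_getElem _ _ hjv]

-- Folding one column: the accumulator triple is (any-neg, any-pos, sum).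
lemma pc_col_fold (sub : List (List Int)) (f : List Int → Int) :
    ∀ (b1 b2 : Bool) (s : Int),
      sub.foldl (fun t v => pcStep t (f v)) (b1, b2, s) =
        (b1 || sub.any (fun v => decide (f v < 0)),
         b2 || sub.any (fun v => decide (0 < f v)),
         s + (sub.map f).sum) := by
  induction sub with
  | nil => intro b1 b2 s; simp
  | cons v sub ih =>
    intro b1 b2 s
    rw [List.foldl_cons,
        show pcStep (b1, b2, s) (f v)
          = (b1 || decide (f v < 0), b2 || decide (0 < f v), s + f v) from rfl,
        ih, List.any_cons, List.any_cons, List.map_cons, List.sum_cons]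
    refine Prod.ext (by simp [Bool.or_assoc]) (Prod.ext (by simp [Bool.or_assoc]) (by simp; ring))

lemma pc_all_not_any_neg (l : List Int) :
    l.all (fun x => decide (0 ≤ x)) = !l.any (fun x => decide (x < 0)) := by
  induction l with
  | nil => rfl
  | cons x l ih =>
    simp only [List.all_cons, List.any_cons, ih, Bool.not_or]
    congr 1
    rw [← decide_not, decide_eq_decide]
    omega

lemma pc_all_not_any_pos (l : List Int) :
    l.all (fun x => decide (x ≤ 0)) = !l.any (fun x => decide (0 < x)) := by
  induction l with
  | nil => rfl
  | cons x l ih =>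
    simp only [List.all_cons, List.any_cons, ih, Bool.not_or]
    congr 1
    rw [← decide_not, decide_eq_decide]
    omega

-- ===== VERDICT (by name: the statement is the Claim_ definition above) =====
theorem project_consensus_spec : Claim_equal_project_consensus := by
  intro sub n _hdom hpre
  show project_consensus sub n = project_consensus_alt sub n
  have hB : project_consensus_alt sub n =
      (sub.foldl (fun acc v => List.zipWith pcStep acc v)
        (List.replicate (max n 0).toNat (false, false, 0))).map pcRender := rfl
  have hlen0 : (List.replicate (max n 0).toNat ((false, false, 0) : Bool × Bool × Int)).length
      = n.toNat := by simp; omega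
  have hpre' : ∀ v ∈ sub,
      (List.replicate (max n 0).toNat ((false, false, 0) : Bool × Bool × Int)).length ≤ v.length := by
    intro v hv
    have := hpre v hv
    rw [hlen0]; omega
  obtain ⟨hfl, hfe⟩ := pc_fold_elem sub _ hpre'
  rw [pc_A_eq_map, hB]
  apply List.ext_getElem
  · simp only [List.length_map, PySem.List.length_pyRange_one, hfl, hlen0]; omega
  · intro j h1 h2
    have hjn : j < n.toNat := by
      simpa [PySem.List.length_pyRange_one] using h1
    have hja : j < (List.replicate (max n 0).toNat ((false, false, 0) : Bool × Bool × Int)).length := by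
      omega
    have hji : (PySem.List.pyRange 0 n 1)[j]'(by rw [PySem.List.length_pyRange_one]; omega) = (j : Int) := by
      rw [PySem.List.getElem_pyRange_one]; ring
    have hjf : j < (sub.foldl (fun acc v => List.zipWith pcStep acc v)
        (List.replicate (max n 0).toNat (false, false, 0))).length := by omega
    rw [List.getElem_map, List.getElem_map, hji,
        ← List.getD_eq_getElem _ ((false, false, 0) : Bool × Bool × Int) hjf,
        hfe j hja, List.getD_eq_getElem _ _ hja, List.getElem_replicate,
        pc_col_fold sub (fun v => v.getD j 0) false false 0]
    unfold pcColA pcRender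
    simp only [PySem.List.pyGetD_natCast, Bool.false_or, zero_add]
    rw [pc_all_not_any_neg, pc_all_not_any_pos, List.any_map, List.any_map]
    rfl
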